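-- pv_equiv track=rewrite | github.com/GUOSHU-COOL/PRIME-In_for_T_cell_engineering | src/common_analysis_utils.py | reverse_cigar
-- ===== SOURCE A (Python) =====
-- def reverse_cigar(cigar: str) -> str:
--     """
--     Reverse the operation order in a CIGAR string.
--
--     Args:
--         cigar (str): CIGAR string.
--
--     Returns:
--         str: Reversed CIGAR string.
--     """
--     new_cigar = []
--     i = 0
--     while i < len(cigar):
--         num = ""
--         while i < len(cigar) and cigar[i].isdigit():
--             num += cigar[i]
--             i += 1
--         if i < len(cigar):
--             new_cigar.insert(0, num + cigar[i])
--             i += 1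
--     return ''.join(new_cigar)
-- ===== SOURCE B (Python) =====
-- import re
--
--
-- def reverse_cigar(cigar: str) -> str:
--     """Reverse the operation order in a CIGAR string."""
--     return ''.join(reversed(re.findall(r'\d*\D', cigar)))
-- ===== Notes on version B (the rewrite author's own statement) =====
-- stated objective: faster
-- what changed: B tokenizes the CIGAR string with a single regex (re.findall(r'\d*\D', ...)) and joins the reversed token list, replacing A's manual character scan that builds the result by quadratic insert(0, ...) front-insertion.
import Mathlib
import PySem

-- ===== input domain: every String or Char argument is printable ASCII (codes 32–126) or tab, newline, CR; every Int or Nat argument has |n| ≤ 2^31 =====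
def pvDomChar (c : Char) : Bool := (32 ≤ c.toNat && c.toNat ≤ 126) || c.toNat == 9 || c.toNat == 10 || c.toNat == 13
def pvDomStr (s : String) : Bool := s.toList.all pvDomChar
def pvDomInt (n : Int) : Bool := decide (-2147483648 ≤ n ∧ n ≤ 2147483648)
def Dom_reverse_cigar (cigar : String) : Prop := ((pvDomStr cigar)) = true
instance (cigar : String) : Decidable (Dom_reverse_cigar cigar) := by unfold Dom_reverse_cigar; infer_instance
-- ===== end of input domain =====

-- B replaces A's manual scan with insert(0,..) by a regex tokenization (re.findall(r'\d*\D')) joined in reverse: idiomatic, and avoids quadratic front-insertion.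

-- ===== PORT A =====
-- A's outer while loop: scan a run of digits (inner while = takeWhile isdigit),
-- then if a char remains, insert(0, num + op) into the accumulator and continue.
def revcLoopA (cs : List Char) (acc : List (List Char)) : List (List Char) :=
  match h : cs.drop (cs.takeWhile PySem.Chars.isdigit).length with
  | [] => acc
  | _op :: rest => revcLoopA rest (((cs.takeWhile PySem.Chars.isdigit) ++ [_op]) :: acc)
termination_by cs.length
decreasing_by
  have := congrArg List.length h
  simp [List.length_drop] at this
  omega

def reverse_cigar (cigar : String) : String :=
  String.ofList (revcLoopA cigar.toList []).flatten   -- ''.join(new_cigar)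

-- ===== PORT B =====
-- one regex-match attempt of r'\d*\D' at the current position: greedy digits, then one non-digit
def revcMatch (cs : List Char) : Option (List Char × List Char) :=
  match cs.drop (cs.takeWhile PySem.Chars.isdigit).length with
  | [] => none
  | c :: rest => some ((cs.takeWhile PySem.Chars.isdigit) ++ [c], rest)

theorem revcMatch_lt {cs t rest} (h : revcMatch cs = some (t, rest)) :
    rest.length < cs.length := by
  unfold revcMatch at h
  split at h
  · exact absurd h (by simp)
  · rename_i c r hdrop
    cases h
    have := congrArg List.length hdrop
    simp [List.length_drop] at this
    omega

-- re.findall(r'\d*\D', s): match at the current position; on success consume the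
-- match and emit the token, on failure advance one character (regex engine's scan)
def revcFindall (cs : List Char) : List (List Char) :=
  match cs with
  | [] => []
  | c :: cs' =>
    match h : revcMatch (c :: cs') with
    | some (t, rest) => t :: revcFindall rest
    | none => revcFindall cs'
termination_by cs.length
decreasing_by
  · exact revcMatch_lt h
  · simp

def reverse_cigar_alt (cigar : String) : String :=
  String.ofList ((revcFindall cigar.toList).reverse.flatten)   -- ''.join(reversed(tokens))

-- ===== PRECONDITION & SPEC =====
def Spec_reverse_cigar (cigar : String) (out : String) : Prop := out = reverse_cigar_alt cigar
instance (cigar : String) (out : String) : Decidable (Spec_reverse_cigar cigar out) := by unfold Spec_reverse_cigar; infer_instance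

-- ===== CLAIM (what is proved, stated in full; the proofs are below) =====
def Claim_equal_reverse_cigar : Prop := ∀ (cigar : String), Dom_reverse_cigar cigar → Spec_reverse_cigar cigar (reverse_cigar cigar)

-- ===== LEMMAS AND PROOFS =====
theorem revcMatch_none {cs : List Char}
    (h : cs.drop (cs.takeWhile PySem.Chars.isdigit).length = []) : revcMatch cs = none := by
  unfold revcMatch
  split
  · rfl
  · rename_i c r hdrop; rw [h] at hdrop; cases hdrop

theorem revcMatch_some {cs : List Char} {op : Char} {rest : List Char}
    (h : cs.drop (cs.takeWhile PySem.Chars.isdigit).length = op :: rest) :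
    revcMatch cs = some (cs.takeWhile PySem.Chars.isdigit ++ [op], rest) := by
  unfold revcMatch
  split
  · rename_i hdrop; rw [h] at hdrop; cases hdrop
  · rename_i c r hdrop
    rw [h] at hdrop
    injection hdrop with h1 h2
    rw [h1, h2]

theorem revcFindall_all_digits (cs : List Char)
    (h : cs.drop (cs.takeWhile PySem.Chars.isdigit).length = []) : revcFindall cs = [] := by
  induction cs with
  | nil => rw [revcFindall]
  | cons c cs' ih =>
    have hd : PySem.Chars.isdigit c = true := by
      by_contra hnd
      simp [hnd] at h
    rw [revcFindall]
    rw [revcMatch_none h]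
    apply ih
    rw [List.takeWhile_cons, if_pos hd] at h
    simpa using h

theorem revcLoopA_eq (cs : List Char) (acc : List (List Char)) :
    revcLoopA cs acc = (revcFindall cs).reverse ++ acc := by
  induction cs, acc using revcLoopA.induct with
  | case1 cs acc h =>
    rw [revcLoopA]
    split
    · rw [revcFindall_all_digits cs h]; simp
    · rename_i op rest hdrop; rw [h] at hdrop; cases hdrop
  | case2 cs acc op rest h ih =>
    rw [revcLoopA]
    split
    · rename_i hdrop; rw [h] at hdrop; cases hdrop
    · rename_i op' rest' hdrop
      rw [h] at hdrop
      injection hdrop with h1 h2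
      subst h1; subst h2
      rw [ih]
      have hne : cs ≠ [] := by
        intro hnil; subst hnil; simp at h
      obtain ⟨c, cs', rfl⟩ := List.exists_cons_of_ne_nil hne
      rw [revcFindall, revcMatch_some h]
      simp

-- ===== VERDICT (by name: the statement is the Claim_ definition above) =====
theorem reverse_cigar_spec : Claim_equal_reverse_cigar := by
  intro cigar _
  unfold Spec_reverse_cigar reverse_cigar reverse_cigar_alt
  rw [revcLoopA_eq]
  simp
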